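-- pv_equiv track=rewrite | github.com/datandrews/AlmAndrews-K-Sets | Alm-Andrews-H-free-colorings.py | has_K5_2
-- ===== SOURCE A (Python) =====
-- import itertools
--
-- def has_K5_2(A,m):
--     # m is the modulus
--     # assumes A is symmetric, i.e., x in A --> -x mod m in A
--     for a,b,c,d,e in itertools.combinations(A,5):
--         for x,y in itertools.combinations(A,2):
--             if len({a,b,c,d,e} & {x,y}) == 0:
--                 if (a-x)%m in A and (a-y)%m in A:
--                     if (b-x)%m in A and (b-y)%m in A:
--                         if (c-x)%m in A and (c-y)%m in A:
--                             if (d-x)%m in A and (d-y)%m in A: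
--                                 if (e-x)%m in A and (e-y)%m in A:
--                                     return True
--     return False
-- ===== SOURCE B (Python) =====
-- import itertools
--
-- def has_K5_2(A, m):
--     # m is the modulus; A is a symmetric set of residues mod m.
--     # For each candidate pair (x, y), count the z in A outside {x, y} whose two
--     # differences z-x and z-y (mod m) both land in A; five such z suffice.
--     S = set(A)
--     for x, y in itertools.combinations(A, 2):
--         zs = [z for z in A if z != x and z != y]
--         if len(zs) < 5:
--             continue
--         good = sum(1 for z in zs if (z - x) % m in S and (z - y) % m in S)
--         if good >= 5:
--             return True
--     return False
-- ===== Notes on version B (the rewrite author's own statement) =====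
-- stated objective: faster
-- what changed: Instead of scanning all 5-combinations x 2-combinations of A, B iterates only over the pairs (x,y), prunes pairs leaving fewer than 5 elements outside {x,y}, and counts in one pass the z outside {x,y} with (z-x)%m and (z-y)%m in a precomputed set of A, succeeding when the count reaches 5.
import Mathlib
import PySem

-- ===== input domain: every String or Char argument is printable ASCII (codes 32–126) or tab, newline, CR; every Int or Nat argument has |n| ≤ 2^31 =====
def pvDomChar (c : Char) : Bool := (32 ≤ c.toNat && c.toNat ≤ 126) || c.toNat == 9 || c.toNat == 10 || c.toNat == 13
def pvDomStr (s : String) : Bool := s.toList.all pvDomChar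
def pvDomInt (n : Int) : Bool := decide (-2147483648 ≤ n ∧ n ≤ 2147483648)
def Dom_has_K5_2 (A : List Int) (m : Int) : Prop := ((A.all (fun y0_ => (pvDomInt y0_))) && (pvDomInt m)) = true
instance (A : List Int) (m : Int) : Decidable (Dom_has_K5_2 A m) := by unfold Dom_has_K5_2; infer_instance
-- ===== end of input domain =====

-- B replaces A's scan over all 5-combinations × 2-combinations by, per pair (x,y),
-- a one-pass count of the z in A outside {x,y} with both differences (mod m) in A
-- (objective: faster).

-- ===== PORT A =====
-- itertools.combinations(xs, r) (exact: all r-sublists, lexicographic by position)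
def pvCombs {α : Type} : Nat → List α → List (List α)
  | 0, _ => [[]]
  | _+1, [] => []
  | n+1, x :: xs => ((pvCombs n xs).map (fun t => x :: t)) ++ pvCombs (n+1) xs

def has_K5_2 (A : List Int) (m : Int) : Bool :=
  (pvCombs 5 A).any (fun q =>
    (pvCombs 2 A).any (fun p =>
      match q, p with
      | [a,b,c,d,e], [x,y] =>
        (PySem.Set.len (PySem.Set.inter (PySem.Set.ofList [a,b,c,d,e]) (PySem.Set.ofList [x,y])) == 0)
        && ((A.contains (PySem.Int.mod (a-x) m) && A.contains (PySem.Int.mod (a-y) m))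
        && ((A.contains (PySem.Int.mod (b-x) m) && A.contains (PySem.Int.mod (b-y) m))
        && ((A.contains (PySem.Int.mod (c-x) m) && A.contains (PySem.Int.mod (c-y) m))
        && ((A.contains (PySem.Int.mod (d-x) m) && A.contains (PySem.Int.mod (d-y) m))
        && (A.contains (PySem.Int.mod (e-x) m) && A.contains (PySem.Int.mod (e-y) m))))))
      | _, _ => false))

-- ===== PORT B =====
-- itertools.combinations(xs, 2) unpacked as pairs, lexicographic by position
def pvPairs : List Int → List (Int × Int)
  | [] => []
  | x :: xs => (xs.map (fun y => (x, y))) ++ pvPairs xs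

def has_K5_2_alt (A : List Int) (m : Int) : Bool :=
  let S := PySem.Set.ofList A
  (pvPairs A).any (fun p =>
    let zs := A.filter (fun z => z != p.1 && z != p.2)
    if (zs.length : Int) < 5 then false
    else decide (5 ≤ zs.foldl (fun good z =>
      if S.contains (PySem.Int.mod (z - p.1) m) && S.contains (PySem.Int.mod (z - p.2) m)
      then good + 1 else good) (0 : Int)))

-- ===== PRECONDITION & SPEC =====
-- Pre_ excludes exactly the m = 0 inputs on which both Pythons reach a '%' and raise
-- ZeroDivisionError: those where some pair (x, y) of A leaves at least 5 elements of A
-- outside {x, y}; on every other m = 0 input both return False.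
def Pre_has_K5_2 (A : List Int) (m : Int) : Prop :=
  m ≠ 0 ∨ ¬ ∃ x ∈ A, ∃ y ∈ A, (x = y → 2 ≤ A.count x) ∧ 5 ≤ (A.filter (fun z => z != x && z != y)).length
instance (A : List Int) (m : Int) : Decidable (Pre_has_K5_2 A m) := by unfold Pre_has_K5_2; infer_instance
def pvWitness_has_K5_2 : List Int × Int := ([0, 1, 2, 3], 7)

def Spec_has_K5_2 (A : List Int) (m : Int) (out : Bool) : Prop := out = has_K5_2_alt A m
instance (A : List Int) (m : Int) (out : Bool) : Decidable (Spec_has_K5_2 A m out) := by unfold Spec_has_K5_2; infer_instance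

-- ===== CLAIM (what is proved, stated in full; the proofs are below) =====
def Claim_equal_has_K5_2 : Prop := ∀ (A : List Int) (m : Int), Dom_has_K5_2 A m → Pre_has_K5_2 A m → Spec_has_K5_2 A m (has_K5_2 A m)

-- ===== LEMMAS AND PROOFS =====

-- "z is usable for the pair (x,y)": z outside {x,y} and both differences land in A
def pvGood (A : List Int) (m x y z : Int) : Bool :=
  z != x && z != y && A.contains (PySem.Int.mod (z - x) m) && A.contains (PySem.Int.mod (z - y) m)

theorem mem_pvCombs : ∀ (xs : List Int) (n : Nat) (l : List Int),
    l ∈ pvCombs n xs ↔ l.Sublist xs ∧ l.length = n := by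
  intro xs
  induction xs with
  | nil =>
    intro n l
    cases n with
    | zero => simp [pvCombs, List.sublist_nil]
    | succ k =>
      simp only [pvCombs, List.not_mem_nil, false_iff]
      rintro ⟨h1, h2⟩
      rw [List.sublist_nil.1 h1] at h2
      simp at h2
  | cons x xs ih =>
    intro n l
    cases n with
    | zero =>
      simp only [pvCombs, List.mem_singleton]
      constructor
      · rintro rfl; exact ⟨List.nil_sublist _, rfl⟩
      · rintro ⟨_, h2⟩; exact List.length_eq_zero_iff.1 h2
    | succ k =>
      simp only [pvCombs, List.mem_append, List.mem_map, ih]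
      rw [List.sublist_cons_iff]
      constructor
      · rintro (⟨t, ⟨hs, hl⟩, rfl⟩ | ⟨hs, hl⟩)
        · exact ⟨Or.inr ⟨t, rfl, hs⟩, by simp [hl]⟩
        · exact ⟨Or.inl hs, hl⟩
      · rintro ⟨h1 | ⟨r, rfl, hr⟩, hl⟩
        · exact Or.inr ⟨h1, hl⟩
        · exact Or.inl ⟨r, ⟨hr, by simpa using hl⟩, rfl⟩

theorem exists_sublist_iff_countP (P : Int → Bool) (A : List Int) (k : Nat) :
    (∃ l : List Int, l.Sublist A ∧ l.length = k ∧ ∀ z ∈ l, P z = true) ↔ k ≤ A.countP P := by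
  constructor
  · rintro ⟨l, hs, hl, hall⟩
    have h1 : l.filter P = l := List.filter_eq_self.2 hall
    have h2 : (l.filter P).Sublist (A.filter P) := hs.filter P
    rw [h1] at h2
    have := h2.length_le
    rw [List.countP_eq_length_filter]
    omega
  · intro hk
    refine ⟨(A.filter P).take k, ((A.filter P).take_sublist k).trans (A.filter_sublist), ?_, ?_⟩
    · rw [List.length_take, List.countP_eq_length_filter] at *
      omega
    · intro z hz
      exact List.of_mem_filter (List.mem_of_mem_take hz)

theorem disj_iff (a b c d e x y : Int) :
    (PySem.Set.len (PySem.Set.inter (PySem.Set.ofList [a,b,c,d,e]) (PySem.Set.ofList [x,y])) == 0) = true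
    ↔ ∀ z ∈ ([a,b,c,d,e] : List Int), z ≠ x ∧ z ≠ y := by
  rw [beq_iff_eq, PySem.Set.len]
  have h0 : ((PySem.Set.inter (PySem.Set.ofList [a,b,c,d,e]) (PySem.Set.ofList [x,y])).length : Int) = 0
      ↔ PySem.Set.inter (PySem.Set.ofList [a,b,c,d,e]) (PySem.Set.ofList [x,y]) = [] := by
    rw [Int.natCast_eq_zero, List.length_eq_zero_iff]
  rw [h0, List.eq_nil_iff_forall_not_mem]
  constructor
  · intro h z hz
    have hx := h z
    rw [PySem.Set.mem_inter] at hx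
    simp only [PySem.Set.mem_ofList] at hx
    constructor
    · intro hzx; exact hx ⟨hz, by simp [hzx]⟩
    · intro hzy; exact hx ⟨hz, by simp [hzy]⟩
  · intro h z hmem
    rw [PySem.Set.mem_inter] at hmem
    simp only [PySem.Set.mem_ofList] at hmem
    rcases hmem with ⟨h1, h2⟩
    rcases h z h1 with ⟨hx, hy⟩
    simp [hx, hy] at h2

theorem len5 (q : List Int) (h : q.length = 5) : ∃ a b c d e, q = [a,b,c,d,e] := by
  rcases q with _|⟨a,_|⟨b,_|⟨c,_|⟨d,_|⟨e,_|⟨f,q⟩⟩⟩⟩⟩⟩ <;> simp_all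

theorem len2 (p : List Int) (h : p.length = 2) : ∃ x y, p = [x,y] := by
  rcases p with _|⟨x,_|⟨y,_|⟨z,p⟩⟩⟩ <;> simp_all

theorem A_iff (A : List Int) (m : Int) :
    has_K5_2 A m = true ↔ ∃ x y : Int, [x, y].Sublist A ∧ 5 ≤ A.countP (pvGood A m x y) := by
  rw [has_K5_2, List.any_eq_true]
  constructor
  · rintro ⟨q, hq, hbody⟩
    rw [List.any_eq_true] at hbody
    obtain ⟨p, hp, hbody⟩ := hbody
    obtain ⟨hqs, hql⟩ := (mem_pvCombs A 5 q).1 hq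
    obtain ⟨hps, hpl⟩ := (mem_pvCombs A 2 p).1 hp
    obtain ⟨a,b,c,d,e,rfl⟩ := len5 q hql
    obtain ⟨x,y,rfl⟩ := len2 p hpl
    simp only [Bool.and_eq_true] at hbody
    obtain ⟨hdisj, hms⟩ := hbody
    have hd := (disj_iff a b c d e x y).1 hdisj
    refine ⟨x, y, hps, (exists_sublist_iff_countP _ _ 5).1 ⟨[a,b,c,d,e], hqs, rfl, ?_⟩⟩
    intro z hz
    rcases hd z hz with ⟨h1, h2⟩
    simp only [pvGood, Bool.and_eq_true, bne_iff_ne]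
    fin_cases hz <;> simp_all
  · rintro ⟨x, y, hxy, hcnt⟩
    obtain ⟨l, hls, hll, hall⟩ := (exists_sublist_iff_countP _ _ 5).2 hcnt
    obtain ⟨a,b,c,d,e,rfl⟩ := len5 l hll
    refine ⟨[a,b,c,d,e], (mem_pvCombs A 5 _).2 ⟨hls, rfl⟩, ?_⟩
    rw [List.any_eq_true]
    refine ⟨[x,y], (mem_pvCombs A 2 _).2 ⟨hxy, rfl⟩, ?_⟩
    simp only [pvGood, Bool.and_eq_true, bne_iff_ne] at hall
    simp only [Bool.and_eq_true]
    refine ⟨(disj_iff a b c d e x y).2 ?_, ?_⟩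
    · intro z hz
      rcases hall z hz with ⟨⟨⟨h1, h2⟩, _⟩, _⟩
      exact ⟨h1, h2⟩
    · have ha := hall a (by simp)
      have hb := hall b (by simp)
      have hc := hall c (by simp)
      have hd := hall d (by simp)
      have he := hall e (by simp)
      tauto

theorem foldl_count (l : List Int) (P : Int → Bool) (t0 : Int) :
    l.foldl (fun t z => if P z then t + 1 else t) t0 = t0 + (l.countP P : Int) := by
  induction l generalizing t0 with
  | nil => simp
  | cons z l ih =>
    simp only [List.foldl_cons, List.countP_cons]
    by_cases h : P z = true
    · simp [h, ih]; ring
    · simp [h, ih]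

theorem mem_pvPairs : ∀ (xs : List Int) (x y : Int),
    (x, y) ∈ pvPairs xs ↔ [x, y].Sublist xs := by
  intro xs
  induction xs with
  | nil => simp [pvPairs, List.sublist_nil]
  | cons a xs ih =>
    intro x y
    simp only [pvPairs, List.mem_append, List.mem_map, ih, List.sublist_cons_iff]
    constructor
    · rintro (⟨y', hy', h⟩ | h)
      · cases h
        exact Or.inr ⟨[y], rfl, List.singleton_sublist.2 hy'⟩
      · exact Or.inl h
    · rintro (h | ⟨r, hr, hs⟩)
      · exact Or.inr h
      · cases hr
        exact Or.inl ⟨y, List.singleton_sublist.1 hs, rfl⟩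

theorem B_iff (A : List Int) (m : Int) :
    has_K5_2_alt A m = true ↔ ∃ x y : Int, [x, y].Sublist A ∧ 5 ≤ A.countP (pvGood A m x y) := by
  rw [has_K5_2_alt]
  have hS : ∀ w : Int, (PySem.Set.ofList A).contains w = A.contains w := by
    intro w
    rw [Bool.eq_iff_iff]
    simp [PySem.Set.mem_ofList]
  have hcount : ∀ x y : Int,
      (A.filter (fun z => z != x && z != y)).foldl (fun good z =>
        if A.contains (PySem.Int.mod (z - x) m) && A.contains (PySem.Int.mod (z - y) m)
        then good + 1 else good) (0 : Int)
      = (A.countP (pvGood A m x y) : Int) := by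
    intro x y
    rw [foldl_count, List.countP_filter]
    simp only [zero_add]
    congr 2
    funext z
    simp only [pvGood]
    rw [Bool.eq_iff_iff]
    simp only [Bool.and_eq_true]
    tauto
  have hle : ∀ x y : Int,
      A.countP (pvGood A m x y) ≤ (A.filter (fun z => z != x && z != y)).length := by
    intro x y
    rw [← List.countP_eq_length_filter]
    apply List.countP_mono_left
    intro z _ hz
    simp only [pvGood, Bool.and_eq_true] at hz
    simp [hz.1.1.1, hz.1.1.2]
  rw [List.any_eq_true]
  constructor
  · rintro ⟨⟨x, y⟩, hp, hbody⟩
    have hps := (mem_pvPairs A x y).1 hp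
    simp only [hS] at hbody
    split_ifs at hbody
    rw [hcount x y, decide_eq_true_iff] at hbody
    exact ⟨x, y, hps, by exact_mod_cast by omega⟩
  · rintro ⟨x, y, hxy, hcnt⟩
    refine ⟨(x, y), (mem_pvPairs A x y).2 hxy, ?_⟩
    simp only [hS]
    have h5 : ¬ (((A.filter (fun z => z != x && z != y)).length : Int) < 5) := by
      have := hle x y
      omega
    rw [if_neg h5, hcount x y, decide_eq_true_iff]
    exact_mod_cast hcnt

-- ===== VERDICT (by name: the statement is the Claim_ definition above) =====
theorem has_K5_2_spec : Claim_equal_has_K5_2 := by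
  intro A m _ _
  unfold Spec_has_K5_2
  rw [Bool.eq_iff_iff, A_iff, B_iff]
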